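-- pv_equiv track=rewrite | github.com/oldsniffs/primeformpal | primeformpal.py | get_prime_scalemap
-- ===== SOURCE A (Python) =====
-- def blank_scale():
-- 	return [False for i in range(12)]
--
-- def get_prime_scalemap(prime_form):
-- 	scalemap = blank_scale()
-- 	index = 0
-- 	for step in range(12):
-- 		try:
-- 			if step == prime_form[index]:
-- 				scalemap[step] = True
-- 				index += 1
-- 		except IndexError:
-- 			break
-- 	return scalemap
-- ===== SOURCE B (Python) =====
-- def get_prime_scalemap(prime_form):
--     scalemap = [False] * 12
--     current = 0
--     index = 0
--     while index < len(prime_form):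
--         p = prime_form[index]
--         if p < current or p > 11:
--             break
--         scalemap[p] = True
--         current = p + 1
--         index += 1
--     return scalemap
-- ===== Notes on version B (the rewrite author's own statement) =====
-- stated objective: simpler
-- what changed: B walks the input list with a running threshold (current) and breaks early, instead of scanning all 12 output steps with a try/except-guarded pointer as A does.
import Mathlib
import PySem

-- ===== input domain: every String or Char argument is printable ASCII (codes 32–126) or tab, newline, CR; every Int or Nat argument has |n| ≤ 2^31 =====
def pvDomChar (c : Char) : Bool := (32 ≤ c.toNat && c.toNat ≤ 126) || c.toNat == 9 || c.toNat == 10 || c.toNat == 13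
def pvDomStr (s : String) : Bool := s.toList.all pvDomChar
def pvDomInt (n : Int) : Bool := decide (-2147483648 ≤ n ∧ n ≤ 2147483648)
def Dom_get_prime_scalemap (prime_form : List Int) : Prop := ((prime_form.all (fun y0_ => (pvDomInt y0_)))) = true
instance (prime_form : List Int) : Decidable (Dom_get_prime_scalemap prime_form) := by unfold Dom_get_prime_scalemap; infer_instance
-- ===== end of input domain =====

-- B walks the input list with a running threshold and breaks early, instead of
-- scanning all 12 output steps with a try/except pointer (objective: simpler).


-- ===== PORT A =====
-- 'for step in range(12)' with 'break' on IndexError: structural recursion over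
-- the remaining steps; PySem.List.pyGet? returning none = the IndexError branch.
def aLoop (pf : List Int) (sm : List Bool) (index : Nat) : List Nat → List Bool
  | [] => sm
  | step :: rest =>
    match PySem.List.pyGet? pf (index : Int) with
    | none => sm
    | some p =>
      if (step : Int) = p then aLoop pf (sm.set step true) (index + 1) rest
      else aLoop pf sm index rest

def get_prime_scalemap (prime_form : List Int) : List Bool :=
  aLoop prime_form ((List.range 12).map (fun _ => false)) 0 (List.range 12)

-- ===== PORT B =====
-- the while loop of Source B, recursion on the remaining part of the input
def bLoop (pf : List Int) (sm : List Bool) (current : Int) (index : Nat) : List Bool :=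
  if h : index < pf.length then
    let p := pf[index]
    if p < current ∨ p > 11 then sm
    else bLoop pf (sm.set p.toNat true) (p + 1) (index + 1)
  else sm
termination_by pf.length - index

def get_prime_scalemap_alt (prime_form : List Int) : List Bool :=
  bLoop prime_form (List.replicate 12 false) 0 0

-- ===== PRECONDITION & SPEC =====
def Spec_get_prime_scalemap (prime_form : List Int) (out : List Bool) : Prop := out = get_prime_scalemap_alt prime_form
instance (prime_form : List Int) (out : List Bool) : Decidable (Spec_get_prime_scalemap prime_form out) := by unfold Spec_get_prime_scalemap; infer_instance

-- ===== CLAIM (what is proved, stated in full; the proofs are below) =====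
def Claim_equal_get_prime_scalemap : Prop := ∀ (prime_form : List Int), Dom_get_prime_scalemap prime_form → Spec_get_prime_scalemap prime_form (get_prime_scalemap prime_form)

-- ===== LEMMAS AND PROOFS =====

theorem aLoop_step_none (pf : List Int) (sm : List Bool) (index step : Nat)
    (rest : List Nat) (h : ¬ index < pf.length) :
    aLoop pf sm index (step :: rest) = sm := by
  simp [aLoop, PySem.List.pyGet?_natCast, List.getElem?_eq_none (by omega : pf.length ≤ index)]

theorem aLoop_step_some (pf : List Int) (sm : List Bool) (index step : Nat)
    (rest : List Nat) (h : index < pf.length) :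
    aLoop pf sm index (step :: rest) =
      if (step : Int) = pf[index] then aLoop pf (sm.set step true) (index + 1) rest
      else aLoop pf sm index rest := by
  simp [aLoop, PySem.List.pyGet?_natCast, List.getElem?_eq_getElem h]

theorem bLoop_stop (pf : List Int) (sm : List Bool) (current : Int) (index : Nat)
    (h : ¬ index < pf.length) : bLoop pf sm current index = sm := by
  rw [bLoop]; simp [h]

theorem bLoop_step (pf : List Int) (sm : List Bool) (current : Int) (index : Nat)
    (h : index < pf.length) :
    bLoop pf sm current index =
      if pf[index] < current ∨ pf[index] > 11 then sm
      else bLoop pf (sm.set (pf[index]).toNat true) (pf[index] + 1) (index + 1) := by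
  rw [bLoop]; simp [h]

-- Core invariant: A's loop from step s with pointer `index` computes the same
-- result as B's loop with threshold `current = s`.
theorem loop_agree (pf : List Int) :
    ∀ (n s : Nat) (sm : List Bool) (index : Nat), s + n = 12 →
      aLoop pf sm index (List.range' s n) = bLoop pf sm (s : Int) index := by
  intro n
  induction n with
  | zero =>
    intro s sm index hs
    have hs12 : s = 12 := by omega
    subst hs12
    simp only [List.range']
    show sm = _
    by_cases hlt : index < pf.length
    · rw [bLoop_step _ _ _ _ hlt, if_pos (by omega)]
    · rw [bLoop_stop _ _ _ _ hlt]
  | succ n ih =>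
    intro s sm index hs
    rw [List.range'_succ]
    by_cases hlt : index < pf.length
    · rw [aLoop_step_some _ _ _ _ _ hlt]
      by_cases heq : ((s : Int) = pf[index])
      · rw [if_pos heq, ih (s + 1) _ _ (by omega)]
        rw [bLoop_step _ _ _ _ hlt, if_neg (by omega)]
        have h1 : (pf[index]).toNat = s := by omega
        have h2 : pf[index] + 1 = ((s + 1 : Nat) : Int) := by omega
        rw [h1, h2]
      · rw [if_neg heq, ih (s + 1) _ _ (by omega)]
        rw [bLoop_step _ _ _ _ hlt, bLoop_step _ _ _ _ hlt]
        by_cases hbad : pf[index] < (s : Int) ∨ pf[index] > 11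
        · rw [if_pos (by omega), if_pos hbad]
        · rw [if_neg (by omega), if_neg hbad]
    · rw [aLoop_step_none _ _ _ _ _ hlt, bLoop_stop _ _ _ _ hlt]

theorem blank_eq : (List.range 12).map (fun _ => false) = List.replicate 12 false := by
  decide

-- ===== VERDICT (by name: the statement is the Claim_ definition above) =====
theorem get_prime_scalemap_spec : Claim_equal_get_prime_scalemap := by
  intro pf _
  show get_prime_scalemap pf = get_prime_scalemap_alt pf
  unfold get_prime_scalemap get_prime_scalemap_alt
  rw [blank_eq, show List.range 12 = List.range' 0 12 from by decide]
  simpa using loop_agree pf 12 0 (List.replicate 12 false) 0 rfl
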